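-- pv_equiv track=rewrite | github.com/Schwartz210/Pythonics | spreadsheet.py | convert_to_column_numbers
-- ===== SOURCE A (Python) =====
-- def col_to_num(col_str):
--     '''
--     https://stackoverflow.com/questions/7261936/convert-an-excel-or-spreadsheet-column-letter-to-its-number-in-pythonic-fashion
--     '''
--     expn = 0
--     col_num = -1
--     col_str = col_str.upper()
--     for char in reversed(col_str):
--         col_num += (ord(char) - ord('A') + 1) * (26 ** expn)
--         expn += 1
--     return col_num
--
-- def is_letter(character):
--     if type(character) == int:
--         return False
--     elif character.isalpha():
--         return True
--     else:
--         return False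
--
-- def convert_to_column_numbers(columns):
--     out = []
--     for col in columns:
--         if is_letter(col):
--             out.append(col_to_num(col))
--         else:
--             out.append(int(col))
--     return out
-- ===== SOURCE B (Python) =====
-- def convert_to_column_numbers(columns):
--     def horner(s):
--         acc = 0
--         for ch in s.upper():
--             acc = acc * 26 + (ord(ch) - ord('A') + 1)
--         return acc - 1
--     return [horner(col) if type(col) != int and col.isalpha() else int(col)
--             for col in columns]
-- ===== Notes on version B (the rewrite author's own statement) =====
-- stated objective: simpler
-- what changed: Replaces the reversed-string power-sum (26**expn per character, explicit exponent counter, append loop) by a single left-to-right Horner accumulator (acc = acc*26 + digit, then acc-1) inside one list comprehension.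
import Mathlib
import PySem

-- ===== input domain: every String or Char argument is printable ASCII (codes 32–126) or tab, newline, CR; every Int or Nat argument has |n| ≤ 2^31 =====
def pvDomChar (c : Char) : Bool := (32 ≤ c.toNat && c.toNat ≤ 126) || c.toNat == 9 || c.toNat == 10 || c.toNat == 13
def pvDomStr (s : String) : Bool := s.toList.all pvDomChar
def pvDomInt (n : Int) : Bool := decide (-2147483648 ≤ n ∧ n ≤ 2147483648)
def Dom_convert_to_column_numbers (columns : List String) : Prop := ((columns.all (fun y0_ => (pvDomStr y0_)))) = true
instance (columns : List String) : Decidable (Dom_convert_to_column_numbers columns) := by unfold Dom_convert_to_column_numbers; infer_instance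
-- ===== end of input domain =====

-- B replaces A's reversed power-sum letter conversion by a left-to-right Horner accumulator in a single map (simpler decomposition, same cost).


-- ===== PORT A =====
-- col_to_num: reversed string, exponent counter, power-sum starting at -1
def pv_col_to_num (col_str : String) : Int :=
  ((PySem.Str.upper col_str).toList.reverse.foldl
    (fun (p : Int × Nat) ch => (p.1 + ((ch.toNat : Int) - 65 + 1) * 26 ^ p.2, p.2 + 1))
    (-1, 0)).1

-- is_letter: the argument is a String here, so the `type(character) == int` branch is never taken
def pv_is_letter (character : String) : Bool := PySem.Str.strIsalpha character

def convert_to_column_numbers (columns : List String) : List Int :=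
  columns.foldl
    (fun out col =>
      out ++ [if pv_is_letter col then pv_col_to_num col
              else (PySem.Int.ofStr? col).getD 0])  -- none (ValueError) excluded by Pre_
    []

-- ===== PORT B =====
def pv_horner (s : String) : Int :=
  ((PySem.Str.upper s).toList.foldl
    (fun acc ch => acc * 26 + ((ch.toNat : Int) - 65 + 1)) 0) - 1

def convert_to_column_numbers_alt (columns : List String) : List Int :=
  columns.map (fun col =>
    if PySem.Str.strIsalpha col then pv_horner col
    else (PySem.Int.ofStr? col).getD 0)  -- none (ValueError) excluded by Pre_

-- ===== PRECONDITION & SPEC =====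
-- Pre_ excludes exactly the inputs where Python A raises ValueError: a non-alphabetic
-- element that int() cannot parse (e.g. "", "0x10", "a1").
def Pre_convert_to_column_numbers (columns : List String) : Prop :=
  (columns.all (fun col => PySem.Str.strIsalpha col || (PySem.Int.ofStr? col).isSome)) = true
instance (columns : List String) : Decidable (Pre_convert_to_column_numbers columns) := by
  unfold Pre_convert_to_column_numbers; infer_instance

def pvWitness_convert_to_column_numbers : List String := ["AB", " 7 ", "c"]

def Spec_convert_to_column_numbers (columns : List String) (out : List Int) : Prop := out = convert_to_column_numbers_alt columns
instance (columns : List String) (out : List Int) : Decidable (Spec_convert_to_column_numbers columns out) := by unfold Spec_convert_to_column_numbers; infer_instance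

-- ===== CLAIM (what is proved, stated in full; the proofs are below) =====
def Claim_equal_convert_to_column_numbers : Prop := ∀ (columns : List String), Dom_convert_to_column_numbers columns → Pre_convert_to_column_numbers columns → Spec_convert_to_column_numbers columns (convert_to_column_numbers columns)

-- ===== LEMMAS AND PROOFS =====

-- A's power-sum fold equals Horner on the reversed character list
theorem pv_fold_eq (cs : List Char) : ∀ (x : Int) (e : Nat),
    (cs.foldl (fun (p : Int × Nat) ch => (p.1 + ((ch.toNat : Int) - 65 + 1) * 26 ^ p.2, p.2 + 1)) (x, e)).1
      = x + 26 ^ e * (cs.reverse.foldl (fun acc ch => acc * 26 + ((ch.toNat : Int) - 65 + 1)) 0) := by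
  induction cs with
  | nil => intro x e; simp
  | cons c t ih =>
    intro x e
    simp only [List.foldl_cons, List.reverse_cons, List.foldl_append, List.foldl_cons,
      List.foldl_nil, ih]
    ring

theorem pv_col_to_num_eq_horner (s : String) : pv_col_to_num s = pv_horner s := by
  unfold pv_col_to_num pv_horner
  rw [pv_fold_eq]
  simp [List.reverse_reverse]
  ring

-- ===== VERDICT (by name: the statement is the Claim_ definition above) =====
theorem convert_to_column_numbers_spec : Claim_equal_convert_to_column_numbers := by
  intro columns _ _
  unfold Spec_convert_to_column_numbers convert_to_column_numbers convert_to_column_numbers_alt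
  rw [PySem.List.foldl_append_singleton_eq_map]
  exact List.map_congr_left (fun col _ => by
    simp only [pv_is_letter, pv_col_to_num_eq_horner])
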